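-- pv_equiv track=rewrite | github.com/beneeb304/Code-Breakers | code_breakers.py | convert_to_matrix
-- ===== SOURCE A (Python) =====
-- def convert_to_matrix(str, length):
--     # Convert string to 2d array and get rid of brackets for array
--     x = str[1:-1]
--     x = x.replace('[', '')
--     x = x.replace(']', '')
--     x = x.replace(' ', '')
--     x = x.replace('\'', '')
--
--     row = 0
--     col = 0
--     matrix = [['q'] * length for _ in range(10)]
--     for n in x:
--         if n == '\n':
--             row += 1
--             col = 0
--         else:
--             matrix[row][col] = n
--             col += 1
--
--     return matrix
-- ===== SOURCE B (Python) =====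
-- def convert_to_matrix(str, length):
--     # Same cleaning step as the spec: drop outer chars, strip brackets/spaces/quotes
--     x = str[1:-1]
--     for ch in "[] '":
--         x = x.replace(ch, '')
--     # Build the 10 x length matrix row-by-row from the newline-split lines,
--     # padding each line and the row list with 'q'
--     lines = x.split('\n')[:10]
--     matrix = [[c for c in line] + ['q'] * (length - len(line)) for line in lines]
--     matrix += [['q'] * length for _ in range(10 - len(matrix))]
--     return matrix
-- ===== Notes on version B (the rewrite author's own statement) =====
-- stated objective: simpler
-- what changed: B replaces A's flat character scan with mutable row/col counters and in-place writes into a pre-filled 10xlength buffer by splitting the cleaned string into lines up front and building each padded row (and the trailing all-'q' rows) directly with comprehensions.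
import Mathlib
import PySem

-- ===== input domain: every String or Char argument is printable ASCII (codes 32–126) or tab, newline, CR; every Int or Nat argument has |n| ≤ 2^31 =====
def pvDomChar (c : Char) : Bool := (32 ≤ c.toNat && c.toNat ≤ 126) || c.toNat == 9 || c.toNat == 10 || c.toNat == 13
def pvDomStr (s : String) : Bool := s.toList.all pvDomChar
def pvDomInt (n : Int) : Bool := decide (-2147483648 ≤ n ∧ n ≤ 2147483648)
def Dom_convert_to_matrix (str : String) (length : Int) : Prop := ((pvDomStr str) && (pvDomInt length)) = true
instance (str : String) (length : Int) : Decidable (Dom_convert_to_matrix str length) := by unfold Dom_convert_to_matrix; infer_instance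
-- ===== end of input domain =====

-- B replaces A's mutable row/col counter scan by a split-into-lines construction (objective: simpler); same return value on Pre_.

-- ===== PORT A =====
-- literal transliteration of A: clean, then a flat character scan updating (row, col, matrix)
def convert_to_matrix (str : String) (length : Int) : List (List String) :=
  let x0 := PySem.Chars.slice str.toList (some 1) (some (-1))
  let x1 := PySem.Chars.replace x0 ['['] []
  let x2 := PySem.Chars.replace x1 [']'] []
  let x3 := PySem.Chars.replace x2 [' '] []
  let x4 := PySem.Chars.replace x3 ['\''] []
  let fin := x4.foldl
    (fun (st : Nat × Nat × List (List String)) n =>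
      if n = '\n' then (st.1 + 1, 0, st.2.2)
      else (st.1, st.2.1 + 1, st.2.2.modify st.1 (fun row => row.set st.2.1 (String.ofList [n]))))
    (0, 0, List.replicate 10 (List.replicate length.toNat "q"))
  fin.2.2

-- ===== PORT B =====
-- literal transliteration of B: clean, split on '\n', build each padded row, pad to 10 rows
def convert_to_matrix_alt (str : String) (length : Int) : List (List String) :=
  let x := ("[] '".toList).foldl (fun s ch => PySem.Chars.replace s [ch] [])
            (PySem.Chars.slice str.toList (some 1) (some (-1)))
  let lines := PySem.List.slice (PySem.Chars.splitOn x ['\n']) none (some 10)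
  let matrix := lines.map (fun line =>
      line.map (fun c => String.ofList [c]) ++ List.replicate (length - (line.length : Int)).toNat "q")
  matrix ++ List.replicate (10 - matrix.length) (List.replicate length.toNat "q")

-- ===== PRECONDITION & SPEC =====
-- Pre_ admits exactly the inputs on which A returns: every non-empty line of the cleaned
-- string must be one of the first 10 lines and no longer than `length`, else A's
-- matrix[row][col] assignment raises IndexError.
def Pre_convert_to_matrix (str : String) (length : Int) : Prop :=
  let L := PySem.Chars.splitOn
    (PySem.Chars.replace (PySem.Chars.replace (PySem.Chars.replace (PySem.Chars.replace
      (PySem.Chars.slice str.toList (some 1) (some (-1))) ['['] []) [']'] []) [' '] []) ['\''] [])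
    ['\n']
  ∀ i, (h : i < L.length) → L[i] ≠ [] → (i < 10 ∧ ((L[i]).length : Int) ≤ length)
instance (str : String) (length : Int) : Decidable (Pre_convert_to_matrix str length) := by
  unfold Pre_convert_to_matrix; infer_instance

def pvWitness_convert_to_matrix : String × Int := ("[ab\ncd]", 2)

def Spec_convert_to_matrix (str : String) (length : Int) (out : List (List String)) : Prop := out = convert_to_matrix_alt str length
instance (str : String) (length : Int) (out : List (List String)) : Decidable (Spec_convert_to_matrix str length out) := by unfold Spec_convert_to_matrix; infer_instance

-- ===== CLAIM (what is proved, stated in full; the proofs are below) =====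
def Claim_equal_convert_to_matrix : Prop := ∀ (str : String) (length : Int), Dom_convert_to_matrix str length → Pre_convert_to_matrix str length → Spec_convert_to_matrix str length (convert_to_matrix str length)

-- ===== LEMMAS AND PROOFS =====

-- A's loop step, named for the proofs (definitionally the lambda in port A)
def pvStep : (Nat × Nat × List (List String)) → Char → (Nat × Nat × List (List String)) :=
  fun st n =>
    if n = '\n' then (st.1 + 1, 0, st.2.2)
    else (st.1, st.2.1 + 1, st.2.2.modify st.1 (fun row => row.set st.2.1 (String.ofList [n])))

-- structural single-char split, with its cons-onto-head helper
def pvConsHead (a : Char) : List (List Char) → List (List Char)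
  | [] => [[a]]
  | l :: ls => (a :: l) :: ls

def pvSplit : List Char → List (List Char)
  | [] => [[]]
  | a :: t => if a = '\n' then [] :: pvSplit t else pvConsHead a (pvSplit t)

def pvConsAll (p : List Char) : List (List Char) → List (List Char)
  | [] => [p]
  | l :: ls => (p ++ l) :: ls

def pvQrow (len : Int) : List String := List.replicate len.toNat "q"
def pvRowOf (len : Int) (l : List Char) : List String :=
  l.map (fun c => String.ofList [c]) ++ List.replicate (len.toNat - l.length) "q"

lemma pvSplit_ne_nil (x : List Char) : pvSplit x ≠ [] := by
  cases x with
  | nil => simp [pvSplit]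
  | cons a t =>
    simp only [pvSplit]
    split
    · simp
    · cases h : pvSplit t with
      | nil => simp [pvConsHead]
      | cons l ls => simp [pvConsHead]

lemma pvConsAll_nil_of_ne (S : List (List Char)) (h : S ≠ []) : pvConsAll [] S = S := by
  cases S with
  | nil => exact absurd rfl h
  | cons l ls => simp [pvConsAll]

lemma pvGo_single (fuel : Nat) : ∀ (l cur : List Char) (acc : List (List Char)), l.length ≤ fuel →
    PySem.Chars.splitOn.go ['\n'] fuel l cur acc = acc.reverse ++ pvConsAll cur.reverse (pvSplit l) := by
  induction fuel with
  | zero =>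
    intro l cur acc hl
    interval_cases h : l.length
    · rw [List.length_eq_zero_iff] at h; subst h
      rw [PySem.Chars.splitOn.go.eq_def]
      simp [pvSplit, pvConsAll]
  | succ f ih =>
    intro l cur acc hl
    cases l with
    | nil =>
      rw [PySem.Chars.splitOn.go.eq_def]
      simp [pvSplit, pvConsAll]
    | cons c rest =>
      rw [PySem.Chars.splitOn.go.eq_def]
      simp only []
      by_cases hc : c = '\n'
      · subst hc
        have hpre : List.isPrefixOf ['\n'] ('\n' :: rest) = true := by
          simp [List.isPrefixOf]
        rw [if_pos hpre]
        simp only [List.length_cons] at hl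
        rw [ih _ _ _ (by simpa using Nat.le_of_succ_le_succ hl)]
        simp only [List.reverse_nil, List.drop_succ_cons, List.drop_zero, List.length_cons,
          List.length_nil]
        rw [pvConsAll_nil_of_ne _ (pvSplit_ne_nil rest)]
        simp only [pvSplit, if_true]
        cases h : pvSplit rest with
        | nil => exact absurd h (pvSplit_ne_nil rest)
        | cons hd tl => simp [pvConsAll]
      · have hpre : List.isPrefixOf ['\n'] (c :: rest) = false := by
          simp [List.isPrefixOf]
          exact fun h => absurd h.symm hc
        rw [if_neg (by simp [hpre])]
        simp only [List.length_cons] at hl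
        rw [ih _ _ _ (Nat.le_of_succ_le_succ hl)]
        simp only [pvSplit, if_neg hc, List.reverse_cons]
        cases h : pvSplit rest with
        | nil => exact absurd h (pvSplit_ne_nil rest)
        | cons hd tl => simp [pvConsAll, pvConsHead]

lemma pvSplitOn_single (x : List Char) : PySem.Chars.splitOn x ['\n'] = pvSplit x := by
  show PySem.Chars.splitOn.go ['\n'] (x.length + 1) x [] [] = pvSplit x
  rw [pvGo_single (x.length + 1) x [] [] (Nat.le_succ _)]
  simp [pvConsAll_nil_of_ne _ (pvSplit_ne_nil x)]

lemma pvSplit_no_nl (x : List Char) (h : '\n' ∉ x) : pvSplit x = [x] := by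
  induction x with
  | nil => simp [pvSplit]
  | cons a t ih =>
    simp only [List.mem_cons, not_or] at h
    simp [pvSplit, if_neg (Ne.symm h.1), ih h.2, pvConsHead]

lemma pvSplit_append (l t : List Char) (h : '\n' ∉ l) :
    pvSplit (l ++ '\n' :: t) = l :: pvSplit t := by
  induction l with
  | nil => simp [pvSplit]
  | cons a l' ih =>
    simp only [List.mem_cons, not_or] at h
    simp [pvSplit, if_neg (Ne.symm h.1), ih h.2, pvConsHead]

lemma pvFirst_nl (x : List Char) (h : '\n' ∈ x) :
    ∃ l t, x = l ++ '\n' :: t ∧ '\n' ∉ l := by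
  induction x with
  | nil => simp at h
  | cons a x' ih =>
    by_cases ha : a = '\n'
    · exact ⟨[], x', by simp [ha], by simp⟩
    · have h' : '\n' ∈ x' := by
        rcases List.mem_cons.mp h with h1 | h2
        · exact absurd h1.symm ha
        · exact h2
      obtain ⟨l, t, hx, hl⟩ := ih h'
      exact ⟨a :: l, t, by simp [hx], by simp [hl]; exact fun he => ha he.symm⟩

lemma pvModify_at (done : List (List String)) (a : List String) (rest : List (List String))
    (f : List String → List String) :
    List.modify (done ++ a :: rest) done.length f = done ++ f a :: rest := by
  induction done with
  | nil => simp [List.modify_cons]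
  | cons h t ih => simp [ih]

-- folding a newline-free line writes its characters into row r starting at column c
lemma pvLine (l : List Char) : ∀ (c r : Nat) (done : List (List String)) (row : List String)
    (rest : List (List String)), '\n' ∉ l → done.length = r → c + l.length ≤ row.length →
    List.foldl pvStep (r, c, done ++ row :: rest) l
      = (r, c + l.length,
         done ++ (row.take c ++ l.map (fun ch => String.ofList [ch]) ++ row.drop (c + l.length)) :: rest) := by
  induction l with
  | nil => intro c r done row rest _ _ _; simp
  | cons a l' ih =>
    intro c r done row rest hnl hdone hlen
    simp only [List.mem_cons, not_or] at hnl
    have hc : c < row.length := by simp at hlen; omega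
    simp only [List.foldl_cons]
    have hstep : pvStep (r, c, done ++ row :: rest) a
        = (r, c + 1, done ++ (row.set c (String.ofList [a])) :: rest) := by
      simp only [pvStep]
      rw [if_neg (Ne.symm hnl.1), ← hdone, pvModify_at]
    rw [hstep]
    rw [ih (c+1) r done (row.set c (String.ofList [a])) rest hnl.2 hdone (by simp at hlen ⊢; omega)]
    have hset : row.set c (String.ofList [a]) = row.take c ++ String.ofList [a] :: row.drop (c+1) := by
      rw [List.set_eq_take_append_cons_drop, if_pos hc]
    have hlt : (row.take c).length = c := by simp; omega
    have hrow : (row.set c (String.ofList [a])).take (c+1) = row.take c ++ [String.ofList [a]] := by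
      rw [hset, List.take_append, hlt, List.take_take]
      simp
    have hdrop : ∀ k, (row.set c (String.ofList [a])).drop (c + 1 + k) = row.drop (c + 1 + k) := by
      intro k; rw [List.drop_set, if_pos (by omega)]
    have harith : c + (a :: l').length = c + 1 + l'.length := by simp; omega
    rw [harith]
    simp only [Prod.mk.injEq]
    refine ⟨trivial, trivial, ?_⟩
    congr 1
    congr 1
    rw [hrow, hdrop l'.length]
    simp [List.append_assoc]

-- the main invariant: A's flat scan over x builds exactly B's line-by-line matrix
lemma pvRowOf_nil (len : Int) : pvRowOf len [] = pvQrow len := by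
  simp [pvRowOf, pvQrow]

lemma pvMain_nil (len : Int) (r : Nat) (done : List (List String)) :
    (List.foldl pvStep (r, 0, done ++ List.replicate (10 - r) (pvQrow len)) []).2.2
      = done ++ ((pvSplit []).take (10 - r)).map (pvRowOf len)
          ++ List.replicate (10 - r - (pvSplit []).length) (pvQrow len) := by
  simp only [List.foldl_nil, pvSplit]
  by_cases hr : r < 10
  · have h1 : List.take (10 - r) [([] : List Char)] = [[]] := by
      apply List.take_of_length_le; simp; omega
    rw [h1]
    have h2 : 10 - r = (10 - r - 1) + 1 := by omega
    conv_lhs => rw [h2, List.replicate_succ]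
    simp [pvRowOf_nil]
  · have h0 : 10 - r = 0 := by omega
    simp [h0]

lemma pvMain (n : Nat) : ∀ (x : List Char), x.length ≤ n → ∀ (len : Int) (r : Nat)
    (done : List (List String)), done.length = min r 10 →
    (∀ i, (hi : i < (pvSplit x).length) → (pvSplit x)[i] ≠ [] →
        (r + i < 10 ∧ (((pvSplit x)[i]).length : Int) ≤ len)) →
    (List.foldl pvStep (r, 0, done ++ List.replicate (10 - r) (pvQrow len)) x).2.2
      = done ++ ((pvSplit x).take (10 - r)).map (pvRowOf len)
          ++ List.replicate (10 - r - (pvSplit x).length) (pvQrow len) := by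
  induction n with
  | zero =>
    intro x hx len r done hdone h
    have hx0 : x = [] := List.length_eq_zero_iff.mp (Nat.le_zero.mp hx)
    subst hx0
    exact pvMain_nil len r done
  | succ n ih =>
    intro x hx len r done hdone h
    by_cases hnl : '\n' ∈ x
    · obtain ⟨l, t, hxe, hlnl⟩ := pvFirst_nl x hnl
      subst hxe
      have hsplit : pvSplit (l ++ '\n' :: t) = l :: pvSplit t := pvSplit_append l t hlnl
      have ht : t.length ≤ n := by simp at hx; omega
      have hlen' : ∀ i, i < (pvSplit t).length → i + 1 < (pvSplit (l ++ '\n' :: t)).length := by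
        intro i hi; rw [hsplit]; simp; omega
      have hshift : ∀ i, (hi : i < (pvSplit t).length) → (pvSplit t)[i] ≠ [] →
          ((r + 1) + i < 10 ∧ (((pvSplit t)[i]).length : Int) ≤ len) := by
        intro i hi hne
        have hg : (pvSplit (l ++ '\n' :: t))[i+1]'(hlen' i hi) = (pvSplit t)[i] := by
          simp [hsplit]
        have := h (i+1) (hlen' i hi) (by rw [hg]; exact hne)
        rw [hg] at this
        exact ⟨by omega, this.2⟩
      rw [List.foldl_append, List.foldl_cons]
      by_cases hr : r < 10
      · -- write line l into row r, then recurse on t with row r+1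
        have hdone' : done.length = r := by omega
        have hllen : 0 + l.length ≤ (pvQrow len).length := by
          rcases List.eq_nil_or_concat' l with rfl | ⟨ys, y, hly⟩
          · simp
          · have h0lt : 0 < (pvSplit (l ++ '\n' :: t)).length := by rw [hsplit]; simp
            have hg : (pvSplit (l ++ '\n' :: t))[0]'h0lt = l := by simp [hsplit]
            have := (h 0 h0lt (by rw [hg, hly]; simp)).2
            rw [hg] at this
            simp [pvQrow]; omega
        have hrep : List.replicate (10 - r) (pvQrow len)
            = pvQrow len :: List.replicate (10 - r - 1) (pvQrow len) := by
          have : 10 - r = (10 - r - 1) + 1 := by omega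
          conv_lhs => rw [this, List.replicate_succ]
        rw [hrep, pvLine l 0 r done (pvQrow len) _ hlnl hdone' hllen]
        have hstepnl : pvStep (r, 0 + l.length,
              done ++ (List.take 0 (pvQrow len) ++ l.map (fun ch => String.ofList [ch])
                ++ List.drop (0 + l.length) (pvQrow len)) :: List.replicate (10 - r - 1) (pvQrow len)) '\n'
            = (r + 1, 0,
              done ++ (List.take 0 (pvQrow len) ++ l.map (fun ch => String.ofList [ch])
                ++ List.drop (0 + l.length) (pvQrow len)) :: List.replicate (10 - r - 1) (pvQrow len)) := by
          simp [pvStep]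
        rw [hstepnl]
        have hrow : List.take 0 (pvQrow len) ++ l.map (fun ch => String.ofList [ch])
            ++ List.drop (0 + l.length) (pvQrow len) = pvRowOf len l := by
          simp [pvQrow, pvRowOf, List.drop_replicate]
        rw [hrow]
        have hshape : done ++ pvRowOf len l :: List.replicate (10 - r - 1) (pvQrow len)
            = (done ++ [pvRowOf len l]) ++ List.replicate (10 - (r + 1)) (pvQrow len) := by
          have : 10 - r - 1 = 10 - (r + 1) := by omega
          simp [this]
        rw [hshape, ih t ht len (r+1) (done ++ [pvRowOf len l]) (by simp; omega) hshift]
        rw [hsplit]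
        have htake : List.take (10 - r) (l :: pvSplit t)
            = l :: List.take (10 - (r + 1)) (pvSplit t) := by
          have : 10 - r = (10 - (r + 1)) + 1 := by omega
          rw [this, List.take_succ_cons]
        rw [htake]
        have hcnt : 10 - (r + 1) - (pvSplit t).length
            = 10 - r - (l :: pvSplit t).length := by simp; omega
        rw [hcnt]
        simp
      · -- r ≥ 10: the current line must be empty; nothing is written
        have hl0 : l = [] := by
          by_contra hne
          have h0lt : 0 < (pvSplit (l ++ '\n' :: t)).length := by rw [hsplit]; simp
          have hg : (pvSplit (l ++ '\n' :: t))[0]'h0lt = l := by simp [hsplit]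
          have h0 := h 0 h0lt (by rw [hg]; exact hne)
          omega
        subst hl0
        simp only [List.foldl_nil]
        have hstepnl : pvStep (r, 0, done ++ List.replicate (10 - r) (pvQrow len)) '\n'
            = (r + 1, 0, done ++ List.replicate (10 - r) (pvQrow len)) := by
          simp [pvStep]
        rw [hstepnl]
        have hrep : List.replicate (10 - r) (pvQrow len)
            = List.replicate (10 - (r + 1)) (pvQrow len) := by
          have : 10 - r = 0 := by omega
          have h2 : 10 - (r + 1) = 0 := by omega
          rw [this, h2]
        rw [hrep, ih t ht len (r+1) done (by omega) hshift]
        rw [hsplit]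
        have htake : ∀ S : List (List Char), List.take (10 - r) ([] :: S)
            = List.take (10 - (r+1)) S := by
          intro S
          have : 10 - r = 0 := by omega
          have h2 : 10 - (r+1) = 0 := by omega
          rw [this, h2]; simp
        rw [htake]
        have hcnt : 10 - (r + 1) - (pvSplit t).length
            = 10 - r - ([] :: pvSplit t).length := by simp; omega
        rw [hcnt]
    · -- no newline in x: x is the single (last) line
      have hsplit : pvSplit x = [x] := pvSplit_no_nl x hnl
      rcases List.eq_nil_or_concat' x with rfl | ⟨_, _, hxc⟩
      · exact pvMain_nil len r done
      · have hxne : x ≠ [] := by rw [hxc]; simp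
        have h0lt : 0 < (pvSplit x).length := by rw [hsplit]; simp
        have hg : (pvSplit x)[0]'h0lt = x := by simp [hsplit]
        have h0 := h 0 h0lt (by rw [hg]; exact hxne)
        rw [hg] at h0
        have hr : r < 10 := by omega
        have hdone' : done.length = r := by omega
        have hllen : 0 + x.length ≤ (pvQrow len).length := by simp [pvQrow]; omega
        have hrep : List.replicate (10 - r) (pvQrow len)
            = pvQrow len :: List.replicate (10 - r - 1) (pvQrow len) := by
          have : 10 - r = (10 - r - 1) + 1 := by omega
          conv_lhs => rw [this, List.replicate_succ]
        rw [hrep, pvLine x 0 r done (pvQrow len) _ hnl hdone' hllen]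
        have hrow : List.take 0 (pvQrow len) ++ x.map (fun ch => String.ofList [ch])
            ++ List.drop (0 + x.length) (pvQrow len) = pvRowOf len x := by
          simp [pvQrow, pvRowOf, List.drop_replicate]
        simp only [hrow, hsplit]
        have htake : List.take (10 - r) [x] = [x] := by
          apply List.take_of_length_le
          simp; omega
        rw [htake]
        simp

-- bridges: both cleanings agree, and both ports reduce to pvMain's two sides
lemma pvCleanChars : "[] '".toList = ['[', ']', ' ', '\''] := by decide

set_option maxHeartbeats 1000000 in
lemma pvEquiv (str : String) (length : Int) (hpre : Pre_convert_to_matrix str length) :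
    convert_to_matrix str length = convert_to_matrix_alt str length := by
  unfold convert_to_matrix convert_to_matrix_alt
  simp only [pvCleanChars, List.foldl_cons, List.foldl_nil]
  set x := PySem.Chars.replace (PySem.Chars.replace (PySem.Chars.replace (PySem.Chars.replace
      (PySem.Chars.slice str.toList (some 1) (some (-1))) ['['] []) [']'] []) [' '] []) ['\''] []
    with hx
  rw [show (fun (st : Nat × Nat × List (List String)) (n : Char) =>
      if n = '\n' then (st.1 + 1, 0, st.2.2)
      else (st.1, st.2.1 + 1, st.2.2.modify st.1 (fun row => row.set st.2.1 (String.ofList [n]))))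
    = pvStep from rfl]
  unfold Pre_convert_to_matrix at hpre
  simp only [← hx, pvSplitOn_single] at hpre
  have hmain := pvMain x.length x le_rfl length 0 [] (by simp)
    (by intro i hi hne; obtain ⟨h1, h2⟩ := hpre i hi hne; exact ⟨by omega, h2⟩)
  simp only [Nat.sub_zero, List.nil_append] at hmain
  -- now the right-hand sides: B's slice/map/pad is the same matrix
  rw [pvSplitOn_single]
  have hslice : PySem.List.slice (pvSplit x) none (some 10) = (pvSplit x).take 10 := by
    exact PySem.List.slice_to _ (by norm_num)
  rw [hslice]
  have hmap : ((pvSplit x).take 10).map (fun line =>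
        line.map (fun c => String.ofList [c]) ++ List.replicate (length - (line.length : Int)).toNat "q")
      = ((pvSplit x).take 10).map (pvRowOf length) := by
    apply List.map_congr_left
    intro line hline
    obtain ⟨i, hi, heq⟩ := List.mem_iff_getElem.mp hline
    have hi' : i < (pvSplit x).length := by simp at hi; omega
    have hi10 : i < 10 := by simp at hi; omega
    rw [List.getElem_take] at heq
    by_cases hl0 : line = []
    · subst hl0
      simp [pvRowOf]
    · have hb := hpre i hi' (by rw [heq]; exact hl0)
      rw [heq] at hb
      have hlen : (line.length : Int) ≤ length := hb.2
      unfold pvRowOf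
      rw [show ((length : Int) - (line.length : Int)).toNat = length.toNat - line.length by omega]
  rw [hmap]
  have hQ : List.replicate length.toNat "q" = pvQrow length := rfl
  rw [hQ]
  have hcnt : 10 - (((pvSplit x).take 10).map (pvRowOf length)).length
      = 10 - (pvSplit x).length := by simp; omega
  rw [hcnt]
  exact hmain

-- ===== VERDICT (by name: the statement is the Claim_ definition above) =====
theorem convert_to_matrix_spec : Claim_equal_convert_to_matrix := by
  intro str length _ hpre
  unfold Spec_convert_to_matrix
  exact pvEquiv str length hpre
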